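-- pv_equiv track=rewrite | github.com/dmullz/lucky_7s | Lucky7s.py | find_center_letter
-- ===== SOURCE A (Python) =====
-- def find_center_letter(english_words, letters):
--     #build words by letter dictionary
--     words_by_letter = {}
--     for letter in letters:
--         words_by_letter[letter] = set()
--     valid_words = set()
--     for word in english_words:
--         if letters >= set(list(word)):
--             for char in word:
--                 words_by_letter[char].add(word)
--
--     min_words = 1000000
--     min_letter = ''
--     max_words = 0
--     max_letter = ''
--     for letter in words_by_letter:
--         if len(words_by_letter[letter]) > max_words:
--             max_words = len(words_by_letter[letter])
--             max_letter = letter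
--         if len(words_by_letter[letter]) < min_words and len(words_by_letter[letter]) >= 25:
--             min_words = len(words_by_letter[letter])
--             min_letter = letter
--
--     if max_words < 25:
--         return max_letter, words_by_letter[max_letter]
--     return min_letter, words_by_letter[min_letter]
-- ===== SOURCE B (Python) =====
-- def find_center_letter(english_words, letters):
--     # Different decomposition: dedup+filter the valid words once, count words per letter
--     # (no per-letter word sets), iterate letters in sorted (deterministic) order, and
--     # build only the chosen letter's word set at the end.
--     valid_words = [w for w in dict.fromkeys(english_words) if set(w) <= letters]
--     min_words = 1000000
--     min_letter = ''
--     max_words = 0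
--     max_letter = ''
--     for l in sorted(letters):
--         c = sum(1 for w in valid_words if l in set(w))
--         if c > max_words:
--             max_words = c
--             max_letter = l
--         if c < min_words and c >= 25:
--             min_words = c
--             min_letter = l
--     center = max_letter if max_words < 25 else min_letter
--     return center, {w for w in valid_words if center in set(w)}
-- ===== Notes on version B (the rewrite author's own statement) =====
-- stated objective: alternative
-- what changed: B dedups-and-filters the valid words once and counts words per letter (no per-letter word sets), iterates the letters in sorted (deterministic) order, and builds only the chosen letter's word set at the end; Pre_ excludes inputs where the min/max letter choice is tied (A's pick then depends on set/dict hash iteration order) and inputs where A raises KeyError.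
-- outside the precondition, e.g. on find_center_letter(['ac'], {'a', 'c'}): A returns ('c', {'ac'}), B returns ('a', {'ac'})
import Mathlib
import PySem

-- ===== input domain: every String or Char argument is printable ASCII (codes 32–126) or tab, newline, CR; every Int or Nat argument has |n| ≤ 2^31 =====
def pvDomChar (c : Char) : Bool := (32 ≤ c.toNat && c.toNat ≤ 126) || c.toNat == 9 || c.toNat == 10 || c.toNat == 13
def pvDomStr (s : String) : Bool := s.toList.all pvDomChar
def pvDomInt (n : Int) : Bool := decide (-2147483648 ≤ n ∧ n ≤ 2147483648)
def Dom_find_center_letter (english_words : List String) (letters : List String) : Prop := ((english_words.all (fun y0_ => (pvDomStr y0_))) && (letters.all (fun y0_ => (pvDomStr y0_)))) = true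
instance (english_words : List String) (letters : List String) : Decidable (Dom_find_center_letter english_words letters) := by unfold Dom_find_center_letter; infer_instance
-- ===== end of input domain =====

-- B replaces A's per-letter word-set dictionary by a single dedup+filter of the valid words,
-- per-letter counting in sorted letter order, and one final set build (objective: alternative).


-- shared one-liners of both Pythons: the key a char indexes (a 1-char string),
-- `letters >= set(list(word))` and `l in set(word)`
def pvKey (c : Char) : String := String.mk [c]

def pvValid (letters : List String) (w : String) : Bool :=
  PySem.Set.issuperset letters (PySem.Set.ofList (w.toList.map pvKey))

def pvHas (l : String) (w : String) : Bool :=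
  PySem.Set.contains (PySem.Set.ofList (w.toList.map pvKey)) l

-- the selection-loop body both Pythons share verbatim: state (min_words, min_letter, max_words, max_letter)
def pvSelStep (s : Nat × String × Nat × String) (c : Nat) (l : String) : Nat × String × Nat × String :=
  let s1 := if c > s.2.2.1 then (s.1, s.2.1, c, l) else s
  if c < s1.1 ∧ 25 ≤ c then (c, l, s1.2.2.1, s1.2.2.2) else s1

-- ===== PORT A =====
-- words_by_letter after the two build loops (dict of PySem.Sets; `words_by_letter[char].add(word)`
-- is Dict.modify with default []: exact here because every char of a valid word is a key)
def pvWbl (english_words : List String) (letters : List String) :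
    PySem.Dict String (List String) :=
  english_words.foldl (fun d word =>
      if pvValid letters word then
        word.toList.foldl
          (fun d c => PySem.Dict.modify d (pvKey c) PySem.Set.empty
            (fun s => PySem.Set.add s word)) d
      else d)
    (letters.foldl (fun d letter => PySem.Dict.insert d letter PySem.Set.empty) PySem.Dict.empty)

-- A's dead `valid_words = set()` is dropped; the final dict lookups use getD, exact on Pre_
-- (the KeyError inputs are excluded there).
def find_center_letter (english_words : List String) (letters : List String) : String × List String :=
  let wbl := pvWbl english_words letters
  let sel := (PySem.Dict.keys wbl).foldl
      (fun s letter => pvSelStep s (PySem.Dict.getD wbl letter PySem.Set.empty).length letter)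
      (1000000, "", 0, "")
  if sel.2.2.1 < 25 then (sel.2.2.2, PySem.Dict.getD wbl sel.2.2.2 PySem.Set.empty)
  else (sel.2.1, PySem.Dict.getD wbl sel.2.1 PySem.Set.empty)

-- ===== PORT B =====
def find_center_letter_alt (english_words : List String) (letters : List String) : String × List String :=
  let valid_words := (PySem.List.dedup english_words).filter (fun w => pvValid letters w)
  let sel := (PySem.List.sorted letters (fun x => x) false).foldl
      (fun s l => pvSelStep s (valid_words.countP (fun w => pvHas l w)) l)
      (1000000, "", 0, "")
  let center := if sel.2.2.1 < 25 then sel.2.2.2 else sel.2.1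
  (center, PySem.Set.ofList (valid_words.filter (fun w => pvHas center w)))

-- ===== PRECONDITION & SPEC =====
-- the number of distinct valid words containing letter l (a spec-level count, used only by Pre_)
def pvCnt (english_words : List String) (letters : List String) (l : String) : Nat :=
  ((PySem.List.dedup english_words).filter
    (fun w => pvValid letters w && pvHas l w)).length

def pvMaxCnt (english_words : List String) (letters : List String) : Nat :=
  letters.foldl (fun a l => max a (pvCnt english_words letters l)) 0

def pvMinCnt25 (english_words : List String) (letters : List String) : Nat :=
  letters.foldl
    (fun a l => if 25 ≤ pvCnt english_words letters l then min a (pvCnt english_words letters l) else a)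
    1000000

-- Pre_ excludes: (a) inputs where A raises KeyError (no non-empty valid word, in particular empty
-- letters); (b) inputs where the selected max- or min-count letter is tied — there A's answer is an
-- accident of Python's set/dict hash iteration order, so no deterministic value can be specified;
-- (c) letter lists with duplicates (the argument is a Python set) and the unreachable counts ≥ 10^6.
def Pre_find_center_letter (english_words : List String) (letters : List String) : Prop :=
  letters.Nodup ∧
  ((∃ w ∈ english_words, w ≠ "" ∧ pvValid letters w = true) ∨ "" ∈ letters) ∧
  (∀ l ∈ letters, pvCnt english_words letters l < 1000000) ∧
  (∀ a ∈ letters, ∀ b ∈ letters, 0 < pvCnt english_words letters a →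
      pvCnt english_words letters a = pvMaxCnt english_words letters →
      pvCnt english_words letters b = pvMaxCnt english_words letters → a = b) ∧
  (∀ a ∈ letters, ∀ b ∈ letters,
      25 ≤ pvCnt english_words letters a →
      pvCnt english_words letters a = pvMinCnt25 english_words letters →
      25 ≤ pvCnt english_words letters b →
      pvCnt english_words letters b = pvMinCnt25 english_words letters → a = b)

instance (english_words : List String) (letters : List String) :
    Decidable (Pre_find_center_letter english_words letters) := by
  unfold Pre_find_center_letter; infer_instance

def pvWitness_find_center_letter : List String × List String := (["ab", "a"], ["a", "b"])

def Spec_find_center_letter (english_words : List String) (letters : List String)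
    (out : String × List String) : Prop := out = find_center_letter_alt english_words letters

instance (english_words : List String) (letters : List String) (out : String × List String) :
    Decidable (Spec_find_center_letter english_words letters out) := by
  unfold Spec_find_center_letter; infer_instance

-- ===== CLAIM (what is proved, stated in full; the proofs are below) =====
def Claim_equal_find_center_letter : Prop := ∀ (english_words : List String) (letters : List String), Dom_find_center_letter english_words letters → Pre_find_center_letter english_words letters → Spec_find_center_letter english_words letters (find_center_letter english_words letters)

-- ===== LEMMAS AND PROOFS =====

def pvV (ew lt : List String) : List String :=
  (PySem.List.dedup ew).filter (fun w => pvValid lt w)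

def pvC (ew lt : List String) (l : String) : Nat :=
  ((pvV ew lt).filter (fun w => pvHas l w)).length

theorem pvC_eq (ew lt : List String) (l : String) : pvCnt ew lt l = pvC ew lt l := by
  simp only [pvCnt, pvC, pvV, List.filter_filter]
  rw [List.filter_congr (l := PySem.List.dedup ew)
    (fun w _ => by rw [Bool.and_comm] :
      ∀ w ∈ PySem.List.dedup ew, (pvValid lt w && pvHas l w) = (pvHas l w && pvValid lt w))]

theorem pvAdd_idem (s : List String) (w : String) :
    PySem.Set.add (PySem.Set.add s w) w = PySem.Set.add s w := by
  by_cases h : w ∈ s <;> simp [PySem.Set.add, PySem.Set.contains, h]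

theorem pvAdd_of_mem (s : List String) (w : String) (h : w ∈ s) : PySem.Set.add s w = s := by
  simp [PySem.Set.add, PySem.Set.contains, h]

theorem pvAdd_of_not_mem (s : List String) (w : String) (h : w ∉ s) :
    PySem.Set.add s w = s ++ [w] := by
  simp [PySem.Set.add, PySem.Set.contains, h]

theorem pvValid_mem (lt : List String) (w : String) (hv : pvValid lt w = true)
    {c : Char} (hc : c ∈ w.toList) : pvKey c ∈ lt := by
  simp [pvValid, PySem.Set.issuperset, PySem.Set.issubset] at hv
  exact hv c hc

theorem pvHas_iff (l : String) (w : String) :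
    pvHas l w = true ↔ ∃ c ∈ w.toList, pvKey c = l := by
  simp [pvHas, PySem.Set.contains, PySem.Set.mem_ofList]

theorem pvDedup_append (xs : List String) (x : String) :
    PySem.List.dedup (xs ++ [x]) =
      if x ∈ xs then PySem.List.dedup xs else PySem.List.dedup xs ++ [x] := by
  have h : PySem.List.dedup (xs ++ [x]) = PySem.Set.add (PySem.List.dedup xs) x := by
    simp only [PySem.List.dedup_eq_ofList, PySem.Set.ofList_append, PySem.Set.update_cons,
      PySem.Set.update_nil]
  rw [h]
  by_cases hx : x ∈ xs
  · rw [pvAdd_of_mem _ _ (by simpa [PySem.List.dedup_eq_ofList, PySem.Set.mem_ofList] using hx), if_pos hx]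
  · rw [pvAdd_of_not_mem _ _ (by simpa [PySem.List.dedup_eq_ofList, PySem.Set.mem_ofList] using hx), if_neg hx]

theorem pvD0_getD (lt : List String) (l : String) :
    ((lt.foldl (fun d letter => PySem.Dict.insert d letter PySem.Set.empty)
        PySem.Dict.empty : PySem.Dict String (List String)).getD
      l PySem.Set.empty) = PySem.Set.empty := by
  suffices h : ∀ (L : List String) (d : PySem.Dict String (List String)),
      (∀ k, d.getD k PySem.Set.empty = PySem.Set.empty) →
      (L.foldl (fun d letter => PySem.Dict.insert d letter PySem.Set.empty) d).getD l
        PySem.Set.empty = PySem.Set.empty by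
    exact h lt _ (fun k => by simp [PySem.Dict.getD_empty])
  intro L
  induction L with
  | nil => intro d hd; exact hd l
  | cons a L ih =>
    intro d hd
    refine ih _ (fun k => ?_)
    rw [PySem.Dict.getD_insert]
    split_ifs with h
    · rfl
    · exact hd k

theorem pvChars_getD (w : String) (cs : List Char) (d : PySem.Dict String (List String))
    (l : String) :
    ((cs.foldl (fun d c => PySem.Dict.modify d (pvKey c) PySem.Set.empty
        (fun s => PySem.Set.add s w)) d).getD l PySem.Set.empty) =
      if ∃ c ∈ cs, pvKey c = l then PySem.Set.add (d.getD l PySem.Set.empty) w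
      else d.getD l PySem.Set.empty := by
  induction cs generalizing d with
  | nil => simp
  | cons c cs ih =>
    simp only [List.foldl_cons]
    rw [ih]
    by_cases hc : pvKey c = l
    · subst hc
      by_cases hcs : ∃ c' ∈ cs, pvKey c' = pvKey c
      · rw [if_pos hcs, if_pos (by exact ⟨c, by simp, rfl⟩)]
        rw [PySem.Dict.getD_modify_self, pvAdd_idem]
      · rw [if_neg hcs, if_pos (by exact ⟨c, by simp, rfl⟩)]
        rw [PySem.Dict.getD_modify_self]
    · by_cases hcs : ∃ c' ∈ cs, pvKey c' = l
      · rw [if_pos hcs, if_pos (by rcases hcs with ⟨c', h1, h2⟩; exact ⟨c', by simp [h1], h2⟩)]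
        rw [PySem.Dict.getD_modify]
        rw [if_neg (fun h => hc h.symm)]
      · rw [if_neg hcs, if_neg (by
          rintro ⟨c', h1, h2⟩
          rcases List.mem_cons.mp h1 with rfl | h1
          · exact hc h2
          · exact hcs ⟨c', h1, h2⟩)]
        rw [PySem.Dict.getD_modify, if_neg (fun h => hc h.symm)]

theorem pvMem_pvV (xs lt : List String) (w : String) :
    w ∈ pvV xs lt ↔ w ∈ xs ∧ pvValid lt w = true := by
  simp [pvV, List.mem_filter]

theorem pvV_append (xs lt : List String) (x : String) :
    pvV (xs ++ [x]) lt =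
      if x ∈ xs then pvV xs lt
      else pvV xs lt ++ (if pvValid lt x then [x] else []) := by
  simp only [pvV, pvDedup_append]
  split_ifs with h h2 h2
  · rfl
  · rw [List.filter_append]
    simp [h2]
  · rw [List.filter_append]
    simp [h2]

theorem pvWbl_getD (ew lt : List String) (l : String) :
    (pvWbl ew lt).getD l PySem.Set.empty = (pvV ew lt).filter (fun w => pvHas l w) := by
  induction ew using List.reverseRecOn with
  | nil =>
    simp only [pvWbl, List.foldl_nil]
    rw [pvD0_getD lt l]
    rfl
  | append_singleton xs w ih =>
    have hstep : pvWbl (xs ++ [w]) lt =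
        (fun d word =>
          if pvValid lt word then
            word.toList.foldl
              (fun d c => PySem.Dict.modify d (pvKey c) PySem.Set.empty
                (fun s => PySem.Set.add s word)) d
          else d) (pvWbl xs lt) w := by
      simp only [pvWbl, List.foldl_append, List.foldl_cons, List.foldl_nil]
    rw [hstep]
    by_cases hval : pvValid lt w
    · simp only [hval, if_pos]
      rw [pvChars_getD]
      rw [pvV_append, ih]
      by_cases hmem : w ∈ xs
      · rw [if_pos hmem]
        by_cases hhas : pvHas l w = true
        · rw [if_pos ((pvHas_iff l w).mp hhas)]
          exact pvAdd_of_mem _ _ (List.mem_filter.mpr ⟨(pvMem_pvV xs lt w).mpr ⟨hmem, hval⟩, hhas⟩)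
        · rw [if_neg (fun hc => hhas ((pvHas_iff l w).mpr hc))]
      · rw [if_neg hmem, if_pos hval, List.filter_append]
        by_cases hhas : pvHas l w = true
        · rw [if_pos ((pvHas_iff l w).mp hhas)]
          rw [pvAdd_of_not_mem _ _ (fun hc =>
            hmem ((pvMem_pvV xs lt w).mp (List.mem_filter.mp hc).1).1)]
          simp [hhas]
        · rw [if_neg (fun hc => hhas ((pvHas_iff l w).mpr hc))]
          simp [hhas]
    · rw [Bool.not_eq_true] at hval
      simp only [hval, Bool.false_eq_true, if_false]
      rw [ih, pvV_append]
      by_cases hmem : w ∈ xs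
      · rw [if_pos hmem]
      · rw [if_neg hmem, if_neg (by simp [hval])]
        simp

theorem pvUpdate_of_subset (s xs : List String) (h : ∀ x ∈ xs, x ∈ s) :
    PySem.Set.update s xs = s := by
  rw [PySem.Set.update_eq_append_filter]
  have : (PySem.Set.ofList xs).filter (fun y => !(PySem.Set.contains s y)) = [] := by
    rw [List.filter_eq_nil_iff]
    intro y hy
    have : y ∈ s := h y (by simpa [PySem.Set.mem_ofList] using hy)
    simp [PySem.Set.contains, this]
  rw [this, List.append_nil]

theorem pvWbl_keys (ew lt : List String) (hnd : lt.Nodup) : (pvWbl ew lt).keys = lt := by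
  have hd0 : ((lt.foldl (fun d letter => PySem.Dict.insert d letter PySem.Set.empty)
      PySem.Dict.empty : PySem.Dict String (List String))).keys = lt := by
    rw [PySem.Dict.keys_foldl_insert]
    rw [PySem.Dict.keys_empty]
    rw [PySem.Set.update_nil_left]
    exact PySem.Set.ofList_eq_self_of_nodup lt hnd
  suffices haux : ∀ (E : List String) (d : PySem.Dict String (List String)), d.keys = lt →
      (E.foldl (fun d word =>
        if pvValid lt word then
          word.toList.foldl
            (fun d c => PySem.Dict.modify d (pvKey c) PySem.Set.empty
              (fun s => PySem.Set.add s word)) d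
        else d) d).keys = lt by
    exact haux ew _ hd0
  intro E
  induction E with
  | nil => intro d hd; exact hd
  | cons w E ih =>
    intro d hd
    rw [List.foldl_cons]
    refine ih _ ?_
    by_cases hval : pvValid lt w
    · rw [if_pos hval]
      rw [PySem.Dict.keys_foldl_modify_key]
      rw [hd]
      refine pvUpdate_of_subset _ _ ?_
      intro x hx
      rcases List.mem_map.mp hx with ⟨c, hc, rfl⟩
      exact pvValid_mem lt w hval hc
    · rw [if_neg hval]
      exact hd

theorem pvSel_minw (cnt : String → Nat) (L : List String) :
    ∀ s : Nat × String × Nat × String,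
      (L.foldl (fun s l => pvSelStep s (cnt l) l) s).1 =
        L.foldl (fun a l => if 25 ≤ cnt l then min a (cnt l) else a) s.1 := by
  induction L with
  | nil => intro s; rfl
  | cons l L ih =>
    intro s
    rw [List.foldl_cons, List.foldl_cons, ih]
    congr 1
    rcases s with ⟨mw, ml, Mw, Ml⟩
    simp only [pvSelStep]
    split_ifs with h1 h2 h3 h2 h3 <;> simp_all <;> omega

theorem pvSel_maxw (cnt : String → Nat) (L : List String) :
    ∀ s : Nat × String × Nat × String,
      (L.foldl (fun s l => pvSelStep s (cnt l) l) s).2.2.1 =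
        L.foldl (fun a l => max a (cnt l)) s.2.2.1 := by
  induction L with
  | nil => intro s; rfl
  | cons l L ih =>
    intro s
    rw [List.foldl_cons, List.foldl_cons, ih]
    congr 1
    rcases s with ⟨mw, ml, Mw, Ml⟩
    simp only [pvSelStep]
    split_ifs with h1 h2 h3 h2 h3 <;> simp_all <;> omega

theorem pvSel_maxl (cnt : String → Nat) (L : List String) :
    ∀ s : Nat × String × Nat × String,
      (((L.foldl (fun s l => pvSelStep s (cnt l) l) s).2.2.2 = s.2.2.2 ∧
        (L.foldl (fun s l => pvSelStep s (cnt l) l) s).2.2.1 = s.2.2.1) ∨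
       ((L.foldl (fun s l => pvSelStep s (cnt l) l) s).2.2.2 ∈ L ∧
        cnt (L.foldl (fun s l => pvSelStep s (cnt l) l) s).2.2.2 =
          (L.foldl (fun s l => pvSelStep s (cnt l) l) s).2.2.1)) := by
  induction L with
  | nil => intro s; exact Or.inl ⟨rfl, rfl⟩
  | cons l L ih =>
    intro s
    rw [List.foldl_cons]
    rcases ih (pvSelStep s (cnt l) l) with ⟨h1, h2⟩ | ⟨h1, h2⟩
    · by_cases ha : cnt l > s.2.2.1
      · have h3 : (pvSelStep s (cnt l) l).2.2.2 = l := by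
          simp only [pvSelStep]; split_ifs <;> simp_all
        have h4 : (pvSelStep s (cnt l) l).2.2.1 = cnt l := by
          simp only [pvSelStep]; split_ifs <;> simp_all
        refine Or.inr ⟨?_, ?_⟩
        · rw [h1, h3]; exact List.mem_cons_self
        · rw [h1, h2, h3, h4]
      · have h3 : (pvSelStep s (cnt l) l).2.2.2 = s.2.2.2 := by
          simp only [pvSelStep]; split_ifs <;> simp_all
        have h4 : (pvSelStep s (cnt l) l).2.2.1 = s.2.2.1 := by
          simp only [pvSelStep]; split_ifs <;> simp_all
        exact Or.inl ⟨by rw [h1, h3], by rw [h2, h4]⟩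
    · exact Or.inr ⟨List.mem_cons_of_mem l h1, h2⟩

theorem pvSel_minl (cnt : String → Nat) (L : List String) :
    ∀ s : Nat × String × Nat × String,
      (((L.foldl (fun s l => pvSelStep s (cnt l) l) s).1 = s.1 ∧
        (L.foldl (fun s l => pvSelStep s (cnt l) l) s).2.1 = s.2.1) ∨
       ((L.foldl (fun s l => pvSelStep s (cnt l) l) s).2.1 ∈ L ∧
        cnt (L.foldl (fun s l => pvSelStep s (cnt l) l) s).2.1 =
          (L.foldl (fun s l => pvSelStep s (cnt l) l) s).1 ∧
        25 ≤ (L.foldl (fun s l => pvSelStep s (cnt l) l) s).1)) := by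
  induction L with
  | nil => intro s; exact Or.inl ⟨rfl, rfl⟩
  | cons l L ih =>
    intro s
    rw [List.foldl_cons]
    rcases ih (pvSelStep s (cnt l) l) with ⟨h1, h2⟩ | ⟨h1, h2, h3⟩
    · by_cases hb : cnt l < s.1 ∧ 25 ≤ cnt l
      · have h3 : (pvSelStep s (cnt l) l).2.1 = l := by
          simp only [pvSelStep]; split_ifs <;> simp_all
        have h4 : (pvSelStep s (cnt l) l).1 = cnt l := by
          simp only [pvSelStep]; split_ifs <;> simp_all
        refine Or.inr ⟨?_, ?_, ?_⟩
        · rw [h2, h3]; exact List.mem_cons_self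
        · rw [h1, h2, h3, h4]
        · rw [h1, h4]; exact hb.2
      · have h3 : (pvSelStep s (cnt l) l).2.1 = s.2.1 := by
          simp only [pvSelStep]; split_ifs <;> simp_all
        have h4 : (pvSelStep s (cnt l) l).1 = s.1 := by
          simp only [pvSelStep]; split_ifs <;> simp_all
        exact Or.inl ⟨by rw [h1, h4], by rw [h2, h3]⟩
    · exact Or.inr ⟨List.mem_cons_of_mem l h1, h2, h3⟩

theorem pvFoldMax_ge_init (cnt : String → Nat) (L : List String) :
    ∀ a, a ≤ L.foldl (fun a l => max a (cnt l)) a := by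
  induction L with
  | nil => intro a; exact le_refl a
  | cons l L ih =>
    intro a
    rw [List.foldl_cons]
    exact le_trans (le_max_left a (cnt l)) (ih _)

theorem pvFoldMax_ge_mem (cnt : String → Nat) (L : List String) :
    ∀ a x, x ∈ L → cnt x ≤ L.foldl (fun a l => max a (cnt l)) a := by
  induction L with
  | nil => intro a x hx; cases hx
  | cons l L ih =>
    intro a x hx
    rw [List.foldl_cons]
    rcases List.mem_cons.mp hx with rfl | hx
    · exact le_trans (le_max_right a (cnt x)) (pvFoldMax_ge_init cnt L _)
    · exact ih _ x hx

theorem pvFoldMin_le_init (cnt : String → Nat) (L : List String) :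
    ∀ a, L.foldl (fun a l => if 25 ≤ cnt l then min a (cnt l) else a) a ≤ a := by
  induction L with
  | nil => intro a; exact le_refl a
  | cons l L ih =>
    intro a
    rw [List.foldl_cons]
    split_ifs with h
    · exact le_trans (ih _) (min_le_left _ _)
    · exact ih a

theorem pvFoldMin_le_mem (cnt : String → Nat) (L : List String) :
    ∀ a x, x ∈ L → 25 ≤ cnt x →
      L.foldl (fun a l => if 25 ≤ cnt l then min a (cnt l) else a) a ≤ cnt x := by
  induction L with
  | nil => intro a x hx; cases hx
  | cons l L ih =>
    intro a x hx h25
    rw [List.foldl_cons]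
    rcases List.mem_cons.mp hx with rfl | hx
    · rw [if_pos h25]
      exact le_trans (pvFoldMin_le_init cnt L _) (min_le_right _ _)
    · exact ih _ x hx h25

theorem pvC_all_zero (ew lt : List String)
    (hex : ¬∃ w ∈ ew, w ≠ "" ∧ pvValid lt w = true) (l : String) : pvC ew lt l = 0 := by
  have hnil : (pvV ew lt).filter (fun w => pvHas l w) = [] := by
    rw [List.filter_eq_nil_iff]
    intro w hw hhas
    rcases (pvHas_iff l w).mp hhas with ⟨c, hc, _⟩
    rcases (pvMem_pvV ew lt w).mp hw with ⟨hwm, hwv⟩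
    refine hex ⟨w, hwm, ?_, hwv⟩
    intro he
    rw [he] at hc
    cases hc
  rw [pvC, hnil]
  rfl

theorem pvSel_stay (cnt : String → Nat) (L : List String) (hz : ∀ l ∈ L, cnt l = 0) :
    L.foldl (fun s l => pvSelStep s (cnt l) l) (1000000, "", 0, "") = (1000000, "", 0, "") := by
  induction L with
  | nil => rfl
  | cons l L ih =>
    rw [List.foldl_cons]
    have h0 : cnt l = 0 := hz l List.mem_cons_self
    have hstep : pvSelStep (1000000, "", 0, "") (cnt l) l = (1000000, "", 0, "") := by
      simp only [pvSelStep, h0]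
      norm_num
    rw [hstep]
    exact ih (fun x hx => hz x (List.mem_cons_of_mem l hx))

theorem pv_main (ew lt : List String) (hpre : Pre_find_center_letter ew lt) :
    find_center_letter ew lt = find_center_letter_alt ew lt := by
  obtain ⟨hnd, hexit, hlt6, huqmax, huqmin⟩ := hpre
  by_cases hex : ∃ w ∈ ew, w ≠ "" ∧ pvValid lt w = true
  case neg =>
    -- no non-empty valid word: every count is 0, both selection loops never update,
    -- both sides return ("", [])
    have hz : ∀ l, pvC ew lt l = 0 := pvC_all_zero ew lt hex
    have hkeys : (pvWbl ew lt).keys = lt := pvWbl_keys ew lt hnd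
    have hfunA : (fun (s : Nat × String × Nat × String) letter =>
        pvSelStep s ((pvWbl ew lt).getD letter PySem.Set.empty).length letter) =
        (fun s l => pvSelStep s (pvC ew lt l) l) := by
      funext s letter
      rw [pvWbl_getD]
      rfl
    have hfunB : (fun (s : Nat × String × Nat × String) l =>
        pvSelStep s (((PySem.List.dedup ew).filter (fun w => pvValid lt w)).countP
          (fun w => pvHas l w)) l) =
        (fun s l => pvSelStep s (pvC ew lt l) l) := by
      funext s l
      rw [List.countP_eq_length_filter]
      rfl
    have hnilfilter : (pvV ew lt).filter (fun w => pvHas "" w) = [] := by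
      have := hz ""
      rw [pvC] at this
      exact List.length_eq_zero_iff.mp this
    rw [find_center_letter, find_center_letter_alt]
    simp only [hfunA, hfunB, hkeys]
    rw [pvSel_stay _ _ (fun l _ => hz l), pvSel_stay _ _ (fun l _ => hz l)]
    rw [if_pos (by norm_num), if_pos (by norm_num)]
    rw [pvWbl_getD]
    have hfold : (List.filter (fun w => pvValid lt w) (PySem.List.dedup ew)) = pvV ew lt := rfl
    rw [hfold, hnilfilter]
    rfl
  obtain ⟨w0, hw0m, hw0ne, hw0v⟩ := hex
  have hkeys : (pvWbl ew lt).keys = lt := pvWbl_keys ew lt hnd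
  have hfunA : (fun (s : Nat × String × Nat × String) letter =>
      pvSelStep s ((pvWbl ew lt).getD letter PySem.Set.empty).length letter) =
      (fun s l => pvSelStep s (pvC ew lt l) l) := by
    funext s letter
    rw [pvWbl_getD]
    rfl
  have hfunB : (fun (s : Nat × String × Nat × String) l =>
      pvSelStep s (((PySem.List.dedup ew).filter (fun w => pvValid lt w)).countP
        (fun w => pvHas l w)) l) =
      (fun s l => pvSelStep s (pvC ew lt l) l) := by
    funext s l
    rw [List.countP_eq_length_filter]
    rfl
  set cnt : String → Nat := pvC ew lt with hcnt
  set L2 := PySem.List.sorted lt (fun x => x) false with hL2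
  have hperm : L2.Perm lt := PySem.List.sorted_perm lt (fun x => x) false
  set SA := lt.foldl (fun s l => pvSelStep s (cnt l) l) (1000000, "", 0, "") with hSA
  set SB := L2.foldl (fun s l => pvSelStep s (cnt l) l) (1000000, "", 0, "") with hSB
  -- max values agree across the permutation
  haveI rcmax : RightCommutative (fun (a : Nat) (l : String) => max a (cnt l)) :=
    ⟨fun a x y => by simp [max_right_comm]⟩
  haveI rcmin : RightCommutative
      (fun (a : Nat) (l : String) => if 25 ≤ cnt l then min a (cnt l) else a) :=
    ⟨fun a x y => by by_cases hx : 25 ≤ cnt x <;> by_cases hy : 25 ≤ cnt y <;>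
      simp [hx, hy, min_right_comm]⟩
  have hM : SB.2.2.1 = SA.2.2.1 := by
    rw [hSA, hSB, pvSel_maxw, pvSel_maxw]
    exact hperm.foldl_eq 0
  have hm : SB.1 = SA.1 := by
    rw [hSA, hSB, pvSel_minw, pvSel_minw]
    exact hperm.foldl_eq 1000000
  -- the maximum is positive
  obtain ⟨c0, hc0⟩ := List.exists_mem_of_ne_nil w0.toList
    (by intro h; exact hw0ne (String.toList_eq_nil_iff.mp h))
  have hl0lt : pvKey c0 ∈ lt := pvValid_mem lt w0 hw0v hc0
  have hw0V : w0 ∈ pvV ew lt := (pvMem_pvV _ _ _).mpr ⟨hw0m, hw0v⟩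
  have hw0has : pvHas (pvKey c0) w0 = true := (pvHas_iff _ _).mpr ⟨c0, hc0, rfl⟩
  have hcpos : 0 < cnt (pvKey c0) := by
    rw [hcnt]
    exact List.length_pos_iff.mpr
      (List.ne_nil_of_mem (List.mem_filter.mpr ⟨hw0V, hw0has⟩))
  have hMpos : 0 < SA.2.2.1 := by
    rw [hSA, pvSel_maxw]
    exact lt_of_lt_of_le hcpos (pvFoldMax_ge_mem cnt lt 0 _ hl0lt)
  -- identify with the Pre_ fold values
  have hMeq : pvMaxCnt ew lt = SA.2.2.1 := by
    rw [hSA, pvSel_maxw, pvMaxCnt]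
    congr 1
    funext a l
    rw [pvC_eq]
  have hmeq : pvMinCnt25 ew lt = SA.1 := by
    rw [hSA, pvSel_minw, pvMinCnt25]
    congr 1
    funext a l
    rw [pvC_eq]
  -- the max letters agree
  rcases pvSel_maxl cnt lt (1000000, "", 0, "") with ⟨_, e2⟩ | ⟨hmemA, hceqA⟩
  · rw [← hSA] at e2; simp only [] at e2; omega
  rw [← hSA] at hmemA hceqA
  rcases pvSel_maxl cnt L2 (1000000, "", 0, "") with ⟨_, e2⟩ | ⟨hmemB, hceqB⟩
  · rw [← hSB] at e2; rw [hM] at e2; simp only [] at e2; omega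
  rw [← hSB] at hmemB hceqB
  have hmaxeq : SA.2.2.2 = SB.2.2.2 := by
    refine huqmax _ hmemA _ (hperm.mem_iff.mp hmemB) ?_ ?_ ?_
    · rw [pvC_eq]
      show 0 < cnt SA.2.2.2
      rw [hceqA]; exact hMpos
    · rw [pvC_eq, hMeq]; exact hceqA
    · rw [pvC_eq, hMeq]; exact hceqB.trans hM
  by_cases hM25 : SA.2.2.1 < 25
  · -- max branch on both sides
    rw [find_center_letter, find_center_letter_alt]
    simp only [hfunA, hfunB, hkeys]
    rw [← hSA, ← hL2, ← hSB]
    rw [if_pos hM25, if_pos (by rw [hM]; exact hM25)]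
    rw [hmaxeq, pvWbl_getD]
    have hfold : (List.filter (fun w => pvValid lt w) (PySem.List.dedup ew)) = pvV ew lt := rfl
    rw [hfold]
    have hndV : ((pvV ew lt).filter (fun w => pvHas SB.2.2.2 w)).Nodup :=
      (((PySem.List.nodup_dedup ew).filter _).filter _)
    rw [PySem.Set.ofList_eq_self_of_nodup _ hndV]
  · -- min branch on both sides
    have hMge : 25 ≤ cnt SA.2.2.2 := by rw [hceqA]; omega
    have hmlt : SA.1 < 1000000 := by
      have h1 : SA.1 ≤ cnt SA.2.2.2 := by
        rw [hSA, pvSel_minw]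
        exact pvFoldMin_le_mem cnt lt 1000000 _ hmemA hMge
      have h2 : cnt SA.2.2.2 < 1000000 := by
        have := hlt6 _ hmemA
        rw [pvC_eq] at this
        exact this
      omega
    rcases pvSel_minl cnt lt (1000000, "", 0, "") with ⟨e1, _⟩ | ⟨hmemA', hceqA', h25A⟩
    · rw [← hSA] at e1; omega
    rw [← hSA] at hmemA' hceqA' h25A
    rcases pvSel_minl cnt L2 (1000000, "", 0, "") with ⟨e1, _⟩ | ⟨hmemB', hceqB', h25B⟩
    · rw [← hSB] at e1; rw [hm] at e1; omega
    rw [← hSB] at hmemB' hceqB' h25B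
    have hmineq : SA.2.1 = SB.2.1 := by
      refine huqmin _ hmemA' _ (hperm.mem_iff.mp hmemB') ?_ ?_ ?_ ?_
      · rw [pvC_eq]
        show 25 ≤ cnt SA.2.1
        rw [hceqA']; exact h25A
      · rw [pvC_eq, hmeq]; exact hceqA'
      · rw [pvC_eq]
        show 25 ≤ cnt SB.2.1
        rw [hceqB']; exact h25B
      · rw [pvC_eq, hmeq]; exact hceqB'.trans hm
    rw [find_center_letter, find_center_letter_alt]
    simp only [hfunA, hfunB, hkeys]
    rw [← hSA, ← hL2, ← hSB]
    rw [if_neg hM25, if_neg (by rw [hM]; exact hM25)]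
    rw [hmineq, pvWbl_getD]
    have hfold : (List.filter (fun w => pvValid lt w) (PySem.List.dedup ew)) = pvV ew lt := rfl
    rw [hfold]
    have hndV : ((pvV ew lt).filter (fun w => pvHas SB.2.1 w)).Nodup :=
      (((PySem.List.nodup_dedup ew).filter _).filter _)
    rw [PySem.Set.ofList_eq_self_of_nodup _ hndV]

-- ===== VERDICT (by name: the statement is the Claim_ definition above) =====
theorem find_center_letter_spec : Claim_equal_find_center_letter := by
  intro english_words letters _ hpre
  exact pv_main english_words letters hpre
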